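-- pv_equiv track=rewrite | github.com/lucasjacobs170/quiet-reach | quiet_reach V0.2.py | is_contact_intent
-- ===== SOURCE A (Python) =====
-- def is_contact_intent(text: str) -> bool:
--     t = (text or "").strip().lower()
--     if not t:
--         return False
--
--     phrases = [
--         "contact lucas", "reach lucas", "message lucas", "dm lucas", "pm lucas",
--         "talk to lucas", "get in touch", "how can i contact", "how do i contact",
--         "how can i reach", "how do i reach",
--     ]
--     return any(p in t for p in phrases)
-- ===== SOURCE B (Python) =====
-- _PHRASES = [
--     "contact lucas", "reach lucas", "message lucas", "dm lucas", "pm lucas",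
--     "talk to lucas", "get in touch", "how can i contact", "how do i contact",
--     "how can i reach", "how do i reach",
-- ]
--
--
-- def is_contact_intent(text: str) -> bool:
--     t = (text or "").strip().lower()
--     # single left-to-right pass over the text: at each position, test whether
--     # any phrase starts there (instead of one full substring scan per phrase)
--     for i in range(len(t)):
--         if any(t.startswith(p, i) for p in _PHRASES):
--             return True
--     return False
-- ===== Notes on version B (the rewrite author's own statement) =====
-- stated objective: alternative
-- what changed: Replaces A's phrase-major loop (one full substring scan of the text per phrase) by a text-major single left-to-right pass: one loop over the positions of the normalized text that tests at each position whether some phrase starts there.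
import Mathlib
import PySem

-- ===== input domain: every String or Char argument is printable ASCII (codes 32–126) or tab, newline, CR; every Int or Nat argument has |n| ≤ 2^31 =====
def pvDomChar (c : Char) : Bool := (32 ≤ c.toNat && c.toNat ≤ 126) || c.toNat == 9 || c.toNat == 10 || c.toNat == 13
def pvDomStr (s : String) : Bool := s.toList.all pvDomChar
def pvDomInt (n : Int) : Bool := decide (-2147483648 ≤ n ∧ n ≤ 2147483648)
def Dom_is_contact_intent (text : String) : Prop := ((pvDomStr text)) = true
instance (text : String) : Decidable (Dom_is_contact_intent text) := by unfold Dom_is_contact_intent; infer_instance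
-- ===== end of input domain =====

-- B replaces A's per-phrase substring scans by one left-to-right pass over the text,
-- testing at each position whether some phrase starts there (objective: alternative).

-- ===== PORT A =====
def pvPhrases : List String :=
  ["contact lucas", "reach lucas", "message lucas", "dm lucas", "pm lucas",
   "talk to lucas", "get in touch", "how can i contact", "how do i contact",
   "how can i reach", "how do i reach"]

-- `(text or "")` equals `text` for every string argument, so it is ported as `text`.
def is_contact_intent (text : String) : Bool :=
  let t := PySem.Str.lower (PySem.Str.strip text)
  if t = "" then false
  else pvPhrases.any (fun p => PySem.Str.isIn p t)

-- ===== PORT B =====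
def pvPhrases_alt : List String :=
  ["contact lucas", "reach lucas", "message lucas", "dm lucas", "pm lucas",
   "talk to lucas", "get in touch", "how can i contact", "how do i contact",
   "how can i reach", "how do i reach"]

-- the `for i in range(len(t)) … t.startswith(p, i)` loop, as a walk over the tails of t
def pvAltLoop : List Char → Bool
  | [] => false
  | c :: rest => pvPhrases_alt.any (fun p => p.toList.isPrefixOf (c :: rest)) || pvAltLoop rest

def is_contact_intent_alt (text : String) : Bool :=
  let t := PySem.Str.lower (PySem.Str.strip text)
  pvAltLoop t.toList

-- ===== PRECONDITION & SPEC =====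
def Spec_is_contact_intent (text : String) (out : Bool) : Prop := out = is_contact_intent_alt text
instance (text : String) (out : Bool) : Decidable (Spec_is_contact_intent text out) := by unfold Spec_is_contact_intent; infer_instance

-- ===== CLAIM (what is proved, stated in full; the proofs are below) =====
def Claim_equal_is_contact_intent : Prop := ∀ (text : String), Dom_is_contact_intent text → Spec_is_contact_intent text (is_contact_intent text)

-- ===== LEMMAS AND PROOFS =====

lemma pvIsIn_eq_decide (p t : List Char) :
    PySem.Chars.isIn p t = decide (p <:+: t) := by
  apply Bool.eq_iff_iff.mpr
  simp [PySem.Chars.isIn_iff_infix]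

lemma pvAltLoop_eq (l : List Char) :
    pvAltLoop l = pvPhrases_alt.any (fun p => decide (p.toList <:+: l)) := by
  induction l with
  | nil => decide
  | cons c rest ih =>
    rw [pvAltLoop, ih]
    apply Bool.eq_iff_iff.mpr
    simp only [Bool.or_eq_true, List.any_eq_true, decide_eq_true_eq,
      List.isPrefixOf_iff_prefix, List.infix_cons_iff]
    constructor
    · rintro (⟨p, hp, h⟩ | ⟨p, hp, h⟩)
      · exact ⟨p, hp, Or.inl h⟩
      · exact ⟨p, hp, Or.inr h⟩
    · rintro ⟨p, hp, h | h⟩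
      · exact Or.inl ⟨p, hp, h⟩
      · exact Or.inr ⟨p, hp, h⟩

theorem pv_main (text : String) : is_contact_intent text = is_contact_intent_alt text := by
  unfold is_contact_intent is_contact_intent_alt
  by_cases h : PySem.Str.lower (PySem.Str.strip text) = ""
  · simp [h, pvAltLoop]
  · rw [if_neg h, pvAltLoop_eq]
    simp [pvPhrases, pvPhrases_alt, pvIsIn_eq_decide]

-- ===== VERDICT (by name: the statement is the Claim_ definition above) =====
theorem is_contact_intent_spec : Claim_equal_is_contact_intent := by
  intro text _
  simp only [Spec_is_contact_intent]
  exact pv_main text
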